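-- pv_equiv track=rewrite | github.com/dfarre/curve-fits | tcp_fits/example_functions.py | zero
-- ===== SOURCE A (Python) =====
-- def zero(array):
--     lmax, rmax = array[0], max(array[1:])
--     output = abs(lmax - rmax)
--
--     for k in range(1, len(array) - 1):
--         change = False
--
--         if array[k] == rmax:
--             rmax = max(array[k+1:])
--             change = True
--
--         if array[k] > lmax:
--             lmax = array[k]
--             change = True
--
--         if change:
--             output = max({output, abs(lmax - rmax)})
--
--     return output
-- ===== SOURCE B (Python) =====
-- def zero(array):
--     # Suffix maxima in one right-to-left pass, then one left-to-right scan
--     # with a running prefix max: O(n) instead of A's repeated max() over slices.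
--     m = array[-1]
--     sufs = []
--     for x in reversed(array[1:]):
--         m = max(m, x)
--         sufs.append(m)
--     sufs.reverse()          # sufs[k] = max(array[k+1:]) for k in 0..len-2
--     best = 0
--     pm = array[0]
--     for x, s in zip(array, sufs):
--         pm = max(pm, x)
--         best = max(best, abs(pm - s))
--     return best
-- ===== Notes on version B (the rewrite author's own statement) =====
-- stated objective: faster
-- what changed: A recomputes max() over list slices inside the loop (worst-case quadratic); B precomputes the suffix-maxima in one right-to-left pass and then takes the best |prefixmax - suffixmax| in one left-to-right scan.
import Mathlib
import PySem

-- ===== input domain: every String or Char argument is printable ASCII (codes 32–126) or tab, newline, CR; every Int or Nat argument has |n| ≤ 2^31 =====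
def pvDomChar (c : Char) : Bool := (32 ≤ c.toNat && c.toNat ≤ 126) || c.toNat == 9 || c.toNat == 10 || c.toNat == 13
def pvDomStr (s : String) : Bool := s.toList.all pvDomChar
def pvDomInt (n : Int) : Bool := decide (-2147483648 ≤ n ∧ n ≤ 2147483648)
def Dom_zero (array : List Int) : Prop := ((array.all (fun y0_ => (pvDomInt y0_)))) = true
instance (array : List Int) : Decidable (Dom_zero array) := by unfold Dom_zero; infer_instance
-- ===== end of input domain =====

-- B replaces A's per-iteration max() over list slices by precomputed suffix maxima
-- plus one running-prefix-max scan (objective: faster).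


-- ===== PORT A =====
-- literal port of A; the `.getD 0` / `| _, _ => 0` defaults are reached only
-- where the Python raises (length < 2 at the top, never inside the loop).
def zero (array : List Int) : Int :=
  match PySem.List.pyGet? array 0,
        PySem.List.max? (PySem.List.slice array (some 1) none) (fun x => x) with
  | some lmax0, some rmax0 =>
    let st := (PySem.List.pyRange 1 ((array.length : Int) - 1) 1).foldl
      (fun (st : Int × Int × Int) k =>
        let lmax := st.1; let rmax := st.2.1; let output := st.2.2
        let ak := PySem.List.pyGetD array k 0
        let change := false
        let p1 := if ak == rmax then
            ((PySem.List.max? (PySem.List.slice array (some (k + 1)) none) (fun x => x)).getD 0, true)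
          else (rmax, change)
        let rmax := p1.1; let change := p1.2
        let p2 := if ak > lmax then (ak, true) else (lmax, change)
        let lmax := p2.1; let change := p2.2
        let output := if change then max output |lmax - rmax| else output
        (lmax, rmax, output))
      (lmax0, rmax0, |lmax0 - rmax0|)
    st.2.2
  | _, _ => 0

-- ===== PORT B =====
def zero_alt (array : List Int) : Int :=
  match PySem.List.pyGet? array (-1) with
  | none => 0
  | some m0 =>
    match PySem.List.pyGet? array 0 with
    | none => 0
    | some a0 =>
    let p := ((PySem.List.slice array (some 1) none).reverse).foldl
      (fun (st : Int × List Int) x =>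
        let m := max st.1 x
        (m, st.2 ++ [m])) (m0, [])
    let sufs := p.2.reverse
    let q := (array.zip sufs).foldl
      (fun (st : Int × Int) xs =>
        let pm := max st.1 xs.1
        (pm, max st.2 |pm - xs.2|)) (a0, 0)
    q.2

-- ===== PRECONDITION & SPEC =====
-- Pre_: A raises for lists of length < 2 (IndexError on the empty list,
-- ValueError on a singleton from max of an empty slice); exactly those are excluded.
def Pre_zero (array : List Int) : Prop := 2 ≤ array.length
instance (array : List Int) : Decidable (Pre_zero array) := by unfold Pre_zero; infer_instance
def pvWitness_zero : List Int := [3, -1, 4]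

def Spec_zero (array : List Int) (out : Int) : Prop := out = zero_alt array
instance (array : List Int) (out : Int) : Decidable (Spec_zero array out) := by unfold Spec_zero; infer_instance

-- ===== CLAIM (what is proved, stated in full; the proofs are below) =====
def Claim_equal_zero : Prop := ∀ (array : List Int), Dom_zero array → Pre_zero array → Spec_zero array (zero array)

-- ===== LEMMAS AND PROOFS =====

-- max of a nonempty list, as Python's max() computes it ([] case is junk)
def maxL : List Int → Int
  | [] => 0
  | x :: xs => xs.foldl max x

-- suffix maxima: sufsOf l = [maxL (l.drop k) | k < l.length]
def sufsOf : List Int → List Int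
  | [] => []
  | x :: xs => maxL (x :: xs) :: sufsOf xs

-- common specification: best |prefix max - suffix max| over all split points
def hSpec (pm : Int) : List Int → Int
  | [] => 0
  | [x] => |pm - x|
  | x :: y :: xs => max |pm - maxL (x :: y :: xs)| (hSpec (max pm x) (y :: xs))

lemma foldl_max_comm (ys : List Int) : ∀ a b : Int, ys.foldl max (max a b) = max a (ys.foldl max b) := by
  induction ys with
  | nil => intro a b; rfl
  | cons y ys ih => intro a b; simp only [List.foldl_cons]; rw [max_assoc, ih]

lemma maxL_cons (x : Int) (xs : List Int) (h : xs ≠ []) :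
    maxL (x :: xs) = max x (maxL xs) := by
  match xs, h with
  | y :: ys, _ => simp only [maxL, List.foldl_cons, foldl_max_comm]

lemma maxL_tail {x : Int} {xs : List Int} (h : xs ≠ []) (hne : x ≠ maxL (x :: xs)) :
    maxL (x :: xs) = maxL xs := by
  rw [maxL_cons x xs h] at *
  rcases max_choice x (maxL xs) with h1 | h1 <;> omega

lemma first_le_hSpec (pm : Int) (l : List Int) (h : l ≠ []) :
    |pm - maxL l| ≤ hSpec pm l := by
  match l, h with
  | [x], _ => simp [hSpec, maxL]
  | x :: y :: xs, _ => exact le_max_left _ _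

lemma hSpec_nonneg (pm : Int) (l : List Int) (h : l ≠ []) : 0 ≤ hSpec pm l :=
  le_trans (abs_nonneg _) (first_le_hSpec pm l h)

lemma pyGetD_of_drop (array : List Int) (j : Nat) (x : Int) (t : List Int)
    (h : array.drop j = x :: t) : PySem.List.pyGetD array (j : Int) 0 = x := by
  rw [PySem.List.pyGetD_natCast, List.getD_eq_getElem?_getD]
  have hx : array[j]? = some x := by
    have h0 : (array.drop j)[0]? = array[j + 0]? := List.getElem?_drop
    rw [h] at h0
    simpa using h0.symm
  rw [hx]; rfl

lemma drop_succ_of_drop (array : List Int) (j : Nat) (x : Int) (t : List Int)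
    (h : array.drop j = x :: t) : array.drop (j + 1) = t := by
  have h1 : array.drop (j + 1) = (array.drop j).drop 1 := by
    rw [List.drop_drop, Nat.add_comm]
  rw [h1, h]; rfl

lemma slice_of_drop (array : List Int) (j : Nat) (x : Int) (t : List Int)
    (h : array.drop j = x :: t) :
    PySem.List.slice array (some ((j : Int) + 1)) none = t := by
  have hc : ((j : Int) + 1) = ((j + 1 : Nat) : Int) := by push_cast; ring
  rw [hc, PySem.List.slice_from_natCast, drop_succ_of_drop array j x t h]

-- invariant of A's loop: starting at split j with the true prefix/suffix maxima
-- and an output that already dominates the current term, the fold returns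
-- max out (hSpec lmax (array.drop j))
lemma loopA (l : List Int) : ∀ (array : List Int) (j : Nat) (lmax out : Int),
    array.drop j = l → l ≠ [] →
    |lmax - maxL l| ≤ out →
    ((PySem.List.pyRange (j : Int) ((array.length : Int) - 1) 1).foldl
      (fun (st : Int × Int × Int) k =>
        let lmax := st.1; let rmax := st.2.1; let output := st.2.2
        let ak := PySem.List.pyGetD array k 0
        let change := false
        let p1 := if ak == rmax then
            ((PySem.List.max? (PySem.List.slice array (some (k + 1)) none) (fun x => x)).getD 0, true)
          else (rmax, change)
        let rmax := p1.1; let change := p1.2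
        let p2 := if ak > lmax then (ak, true) else (lmax, change)
        let lmax := p2.1; let change := p2.2
        let output := if change then max output |lmax - rmax| else output
        (lmax, rmax, output))
      (lmax, maxL l, out)).2.2 = max out (hSpec lmax l) := by
  induction l with
  | nil => intro _ _ _ _ _ h; exact absurd rfl h
  | cons x t ih =>
    intro array j lmax out hdrop _ hout
    have hjlen : j < array.length := by
      by_contra hc
      have h0 : array.drop j = [] := List.drop_eq_nil_of_le (by omega)
      rw [hdrop] at h0; exact absurd h0 (by simp)
    have hlen : array.length = j + (x :: t).length := by
      have h0 : (array.drop j).length = array.length - j := List.length_drop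
      rw [hdrop] at h0
      omega
    match t with
    | [] =>
      have hl1 : array.length = j + 1 := by simpa using hlen
      have hnil : PySem.List.pyRange (j : Int) ((array.length : Int) - 1) 1 = [] := by
        apply PySem.List.pyRange_one_eq_nil
        rw [hl1]; push_cast; omega
      rw [hnil]
      simp only [List.foldl_nil, hSpec]
      have hml : maxL [x] = x := rfl
      rw [hml] at hout
      omega
    | y :: t' =>
      have hcons : PySem.List.pyRange (j : Int) ((array.length : Int) - 1) 1
          = (j : Int) :: PySem.List.pyRange ((j : Int) + 1) ((array.length : Int) - 1) 1 := by
        apply PySem.List.pyRange_one_cons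
        simp at hlen ⊢; omega
      have hak : PySem.List.pyGetD array (j : Int) 0 = x := pyGetD_of_drop array j x _ hdrop
      have hslice : PySem.List.slice array (some ((j : Int) + 1)) none = y :: t' :=
        slice_of_drop array j x _ hdrop
      have hdrop' : array.drop (j + 1) = y :: t' := drop_succ_of_drop array j x _ hdrop
      have htne : (y :: t') ≠ ([] : List Int) := by simp
      have hMl : maxL (x :: y :: t') = max x (maxL (y :: t')) := maxL_cons x _ htne
      -- one step of the loop body
      have hstep :
          (fun (st : Int × Int × Int) k =>
            let lmax := st.1; let rmax := st.2.1; let output := st.2.2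
            let ak := PySem.List.pyGetD array k 0
            let change := false
            let p1 := if ak == rmax then
                ((PySem.List.max? (PySem.List.slice array (some (k + 1)) none) (fun x => x)).getD 0, true)
              else (rmax, change)
            let rmax := p1.1; let change := p1.2
            let p2 := if ak > lmax then (ak, true) else (lmax, change)
            let lmax := p2.1; let change := p2.2
            let output := if change then max output |lmax - rmax| else output
            (lmax, rmax, output))
            (lmax, maxL (x :: y :: t'), out) (j : Int)
          = (max lmax x, maxL (y :: t'),
             max out |max lmax x - maxL (y :: t')|) := by
        have hMt : ¬ x = maxL (x :: y :: t') → maxL (x :: y :: t') = maxL (y :: t') :=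
          fun h => maxL_tail htne h
        simp only [hak, hslice, PySem.List.max?_id_cons, Option.getD_some]
        by_cases hq : x = maxL (x :: y :: t') <;> by_cases hg : x > lmax
        · have hq' : x = List.foldl max (max x y) t' := by simpa [maxL] using hq
          have hm : max lmax x = x := by omega
          simp [hg, maxL, hm, if_pos hq']
        · have hq' : x = List.foldl max (max x y) t' := by simpa [maxL] using hq
          have hm : max lmax x = lmax := by omega
          simp [hg, maxL, hm, if_pos hq']
        · have hq' : ¬ x = List.foldl max (max x y) t' := by simpa [maxL] using hq
          have h4 : List.foldl max (max x y) t' = List.foldl max y t' := by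
            simpa [maxL] using maxL_tail htne hq
          have hm : max lmax x = x := by omega
          simp [hg, maxL, hm, h4]
          split_ifs <;> simp
        · have hq' : ¬ x = List.foldl max (max x y) t' := by simpa [maxL] using hq
          have h4 : List.foldl max (max x y) t' = List.foldl max y t' := by
            simpa [maxL] using maxL_tail htne hq
          have h5 : max out |lmax - List.foldl max y t'| = out := by
            rw [← h4]
            exact max_eq_left (by simpa [maxL] using hout)
          have hm : max lmax x = lmax := by omega
          have h6 : |lmax - List.foldl max y t'| ≤ out := by omega
          simp [hg, maxL, hm, h4, h5]
          split_ifs <;> simp_all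
      rw [hcons, List.foldl_cons]
      have hcast : ((j : Int) + 1) = ((j + 1 : Nat) : Int) := by push_cast; ring
      have hrest := ih array (j + 1) (max lmax x) (max out |max lmax x - maxL (y :: t')|)
        hdrop' htne (le_max_right _ _)
      rw [← hcast] at hrest
      have hmain :
          (List.foldl
            (fun (st : Int × Int × Int) k =>
              let lmax := st.1; let rmax := st.2.1; let output := st.2.2
              let ak := PySem.List.pyGetD array k 0
              let change := false
              let p1 := if ak == rmax then
                  ((PySem.List.max? (PySem.List.slice array (some (k + 1)) none) (fun x => x)).getD 0, true)
                else (rmax, change)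
              let rmax := p1.1; let change := p1.2
              let p2 := if ak > lmax then (ak, true) else (lmax, change)
              let lmax := p2.1; let change := p2.2
              let output := if change then max output |lmax - rmax| else output
              (lmax, rmax, output))
            ((fun (st : Int × Int × Int) k =>
              let lmax := st.1; let rmax := st.2.1; let output := st.2.2
              let ak := PySem.List.pyGetD array k 0
              let change := false
              let p1 := if ak == rmax then
                  ((PySem.List.max? (PySem.List.slice array (some (k + 1)) none) (fun x => x)).getD 0, true)
                else (rmax, change)
              let rmax := p1.1; let change := p1.2
              let p2 := if ak > lmax then (ak, true) else (lmax, change)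
              let lmax := p2.1; let change := p2.2
              let output := if change then max output |lmax - rmax| else output
              (lmax, rmax, output)) (lmax, maxL (x :: y :: t'), out) ((j : Int)))
            (PySem.List.pyRange ((j : Int) + 1) ((array.length : Int) - 1) 1)).2.2
          = max (max out |max lmax x - maxL (y :: t')|) (hSpec (max lmax x) (y :: t')) := by
        rw [hstep]
        exact hrest
      have hfinal : max (max out |max lmax x - maxL (y :: t')|) (hSpec (max lmax x) (y :: t'))
          = max out (hSpec lmax (x :: y :: t')) := by
        have h1 := first_le_hSpec (max lmax x) (y :: t') htne
        have h3 : hSpec lmax (x :: y :: t')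
            = max |lmax - maxL (x :: y :: t')| (hSpec (max lmax x) (y :: t')) := rfl
        rw [h3]
        omega
      exact hmain.trans hfinal

-- characterization of A
lemma zero_eq_hSpec (a0 r : Int) (rs : List Int) :
    zero (a0 :: r :: rs) = hSpec a0 (r :: rs) := by
  have h0 : PySem.List.pyGet? (a0 :: r :: rs) 0 = some a0 := PySem.List.pyGet?_zero_cons _ _
  have h1 : PySem.List.slice (a0 :: r :: rs) (some 1) none = r :: rs := by
    rw [PySem.List.slice_from_one]; rfl
  have h2 : PySem.List.max? (r :: rs) (fun x => x) = some (maxL (r :: rs)) := by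
    exact PySem.List.max?_id_cons _ _
  unfold zero
  rw [h0, h1, h2]
  have hl := loopA (r :: rs) (a0 :: r :: rs) 1 a0 |a0 - maxL (r :: rs)| rfl (by simp) le_rfl
  simp only [Nat.cast_one] at hl
  simp only [hl]
  exact max_eq_right (first_le_hSpec a0 (r :: rs) (by simp))

-- B's first loop builds the reversed suffix-maxima list
lemma sufs_fold (l : List Int) (hl : l ≠ []) (m0 : Int) (hm0 : l.getLast hl = m0) :
    (l.reverse.foldl
      (fun (st : Int × List Int) x =>
        let m := max st.1 x
        (m, st.2 ++ [m])) (m0, []))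
      = (maxL l, (sufsOf l).reverse) := by
  rw [List.foldl_reverse]
  induction l with
  | nil => exact absurd rfl hl
  | cons x xs ih =>
    match xs with
    | [] =>
      simp only [List.getLast] at hm0
      subst hm0
      simp [maxL, sufsOf]
    | y :: ys =>
      have hxs : (y :: ys) ≠ ([] : List Int) := by simp
      have hlast : (y :: ys).getLast hxs = m0 := by
        rw [← hm0, List.getLast_cons hxs]
      rw [List.foldr_cons, ih hxs hlast]
      have hMl : maxL (x :: y :: ys) = max x (maxL (y :: ys)) := maxL_cons x _ hxs
      simp only [sufsOf, List.reverse_cons]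
      rw [hMl, max_comm x (maxL (y :: ys))]

-- B's second loop computes max best (hSpec (max pm c) l)
lemma loopB (l : List Int) : ∀ (c pm best : Int), l ≠ [] →
    (((c :: l).zip (sufsOf l)).foldl
      (fun (st : Int × Int) xs =>
        let pm := max st.1 xs.1
        (pm, max st.2 |pm - xs.2|)) (pm, best)).2
      = max best (hSpec (max pm c) l) := by
  induction l with
  | nil => intro _ _ _ h; exact absurd rfl h
  | cons x xs ih =>
    intro c pm best _
    match xs with
    | [] =>
      simp [sufsOf, maxL, hSpec]
    | y :: ys =>
      have hxs : (y :: ys) ≠ ([] : List Int) := by simp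
      show (((x :: y :: ys).zip (sufsOf (y :: ys))).foldl _
        (max pm c, max best |max pm c - maxL (x :: y :: ys)|)).2 = _
      rw [ih x (max pm c) (max best |max pm c - maxL (x :: y :: ys)|) hxs]
      have h3 : hSpec (max pm c) (x :: y :: ys)
          = max |max pm c - maxL (x :: y :: ys)| (hSpec (max (max pm c) x) (y :: ys)) := rfl
      rw [h3, max_assoc]

-- characterization of B
lemma zero_alt_eq_hSpec (a0 r : Int) (rs : List Int) :
    zero_alt (a0 :: r :: rs) = hSpec a0 (r :: rs) := by
  have hne : (r :: rs) ≠ ([] : List Int) := by simp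
  have h0 : PySem.List.pyGet? (a0 :: r :: rs) (-1)
      = some ((r :: rs).getLast hne) := by
    rw [PySem.List.pyGet?_neg_one, List.getLast?_cons_cons]
    exact List.getLast?_eq_some_getLast hne
  have h1 : PySem.List.pyGet? (a0 :: r :: rs) 0 = some a0 := PySem.List.pyGet?_zero_cons _ _
  have h2 : PySem.List.slice (a0 :: r :: rs) (some 1) none = r :: rs := by
    rw [PySem.List.slice_from_one]; rfl
  unfold zero_alt
  rw [h0, h1, h2]
  simp only [sufs_fold (r :: rs) hne ((r :: rs).getLast hne) rfl, List.reverse_reverse]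
  rw [loopB (r :: rs) a0 a0 0 hne]
  rw [max_self]
  exact max_eq_right (hSpec_nonneg a0 (r :: rs) hne)

-- ===== VERDICT (by name: the statement is the Claim_ definition above) =====
theorem zero_spec : Claim_equal_zero := by
  intro array _ hpre
  unfold Spec_zero
  match array, hpre with
  | a0 :: r :: rs, _ => rw [zero_eq_hSpec, zero_alt_eq_hSpec]
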